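-- pv_equiv track=rewrite | github.com/zeze98/Algorithm | 백준/Silver/20529. 가장 가까운 세 사람의 심리적 거리/가장 가까운 세 사람의 심리적 거리.py | find_diff
-- ===== SOURCE A (Python) =====
-- def find_diff(arr):
--     score = 0
--     a = list(arr[0])
--     b = list(arr[1])
--     c = list(arr[2])
--     for i in range(4):
--         if a[i] != b[i]:
--             score += 1
--         if a[i] != c[i]:
--             score += 1
--         if c[i] != b[i]:
--             score += 1
--
--     return score
-- ===== SOURCE B (Python) =====
-- def find_diff(arr):
--     # Per position, count distinct characters among the three strings and
--     # convert that to the number of differing pairs via a fixed table.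
--     score = 0
--     for i in range(4):
--         distinct = len({arr[0][i], arr[1][i], arr[2][i]})
--         score += (0, 0, 2, 3)[distinct]
--     return score
-- ===== Notes on version B (the rewrite author's own statement) =====
-- stated objective: alternative
-- what changed: Instead of three pairwise comparisons per position, B builds the set of the three characters at each position and maps its cardinality (1/2/3) to the number of differing pairs (0/2/3) through a fixed lookup table.
import Mathlib
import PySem

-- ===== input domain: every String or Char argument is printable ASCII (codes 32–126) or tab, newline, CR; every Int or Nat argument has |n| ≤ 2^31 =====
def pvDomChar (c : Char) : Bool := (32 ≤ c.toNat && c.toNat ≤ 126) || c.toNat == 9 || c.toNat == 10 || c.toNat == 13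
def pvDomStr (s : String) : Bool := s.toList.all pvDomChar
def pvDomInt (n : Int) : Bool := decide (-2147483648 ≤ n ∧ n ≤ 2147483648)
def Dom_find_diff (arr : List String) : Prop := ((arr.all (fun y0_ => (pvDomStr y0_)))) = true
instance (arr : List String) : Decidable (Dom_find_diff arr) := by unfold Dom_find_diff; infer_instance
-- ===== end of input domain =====

-- B replaces the three pairwise character comparisons per position by the set of the
-- three characters and a fixed table from its cardinality to the number of differing pairs.

-- ===== PORT A =====
def find_diff (arr : List String) : Int :=
  -- a = list(arr[0]); b = list(arr[1]); c = list(arr[2])  (indexing is total under Pre_)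
  let a := (PySem.List.pyGetD arr 0 "").toList
  let b := (PySem.List.pyGetD arr 1 "").toList
  let c := (PySem.List.pyGetD arr 2 "").toList
  (PySem.List.pyRange 0 4 1).foldl (fun score i =>
    let score := if PySem.List.pyGetD a i ' ' ≠ PySem.List.pyGetD b i ' ' then score + 1 else score
    let score := if PySem.List.pyGetD a i ' ' ≠ PySem.List.pyGetD c i ' ' then score + 1 else score
    if PySem.List.pyGetD c i ' ' ≠ PySem.List.pyGetD b i ' ' then score + 1 else score) 0

-- ===== PORT B =====
def find_diff_alt (arr : List String) : Int :=
  (PySem.List.pyRange 0 4 1).foldl (fun score i =>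
    let chars := PySem.Set.ofList
      [PySem.List.pyGetD (PySem.List.pyGetD arr 0 "").toList i ' ',
       PySem.List.pyGetD (PySem.List.pyGetD arr 1 "").toList i ' ',
       PySem.List.pyGetD (PySem.List.pyGetD arr 2 "").toList i ' ']
    score + PySem.List.pyGetD ([0, 0, 2, 3] : List Int) (chars.length : Int) 0) 0

-- ===== PRECONDITION & SPEC =====
-- Pre_ excludes exactly the inputs where Python A raises IndexError:
-- fewer than 3 strings, or one of the first three strings shorter than 4 characters.
def Pre_find_diff (arr : List String) : Prop :=
  3 ≤ arr.length ∧ 4 ≤ (arr.getD 0 "").toList.length ∧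
    4 ≤ (arr.getD 1 "").toList.length ∧ 4 ≤ (arr.getD 2 "").toList.length
instance (arr : List String) : Decidable (Pre_find_diff arr) := by unfold Pre_find_diff; infer_instance
def pvWitness_find_diff : List String := ["abcd", "abce", "xbcd"]
def Spec_find_diff (arr : List String) (out : Int) : Prop := out = find_diff_alt arr
instance (arr : List String) (out : Int) : Decidable (Spec_find_diff arr out) := by unfold Spec_find_diff; infer_instance

-- ===== CLAIM (what is proved, stated in full; the proofs are below) =====
def Claim_equal_find_diff : Prop := ∀ (arr : List String), Dom_find_diff arr → Pre_find_diff arr → Spec_find_diff arr (find_diff arr)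

-- ===== LEMMAS AND PROOFS =====
-- At one position: A's three conditional increments equal B's table lookup on the set size.
lemma pv_step (s : Int) (x y z : Char) :
    (if z ≠ y then (if x ≠ z then (if x ≠ y then s + 1 else s) + 1 else (if x ≠ y then s + 1 else s)) + 1
     else (if x ≠ z then (if x ≠ y then s + 1 else s) + 1 else (if x ≠ y then s + 1 else s)))
      = s + PySem.List.pyGetD ([0, 0, 2, 3] : List Int) ((PySem.Set.ofList [x, y, z]).length : Int) 0 := by
  by_cases hxy : x = y <;> by_cases hxz : x = z <;> by_cases hyz : y = z <;>
    subst_vars <;>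
    simp_all [PySem.Set.ofList, PySem.Set.add, PySem.Set.empty, PySem.List.pyGetD,
      PySem.List.pyIdx?, PySem.List.pyGet?, eq_comm] <;> omega

-- ===== VERDICT (by name: the statement is the Claim_ definition above) =====
theorem find_diff_spec : Claim_equal_find_diff := by
  intro arr _ _
  unfold Spec_find_diff find_diff find_diff_alt
  have hr : PySem.List.pyRange 0 4 1 = [0, 1, 2, 3] := by decide
  rw [hr]
  simp only [List.foldl]
  rw [pv_step, pv_step, pv_step, pv_step]
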